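-- pv_equiv track=rewrite | github.com/davidbierman2003/formal_languages_and_automata | formal_languages_assignment.py | is_in_language_L
-- ===== SOURCE A (Python) =====
-- def is_in_language_L(string):
--     """
--     Check if a string belongs to language L = {a^n b^n | n >= 1}
--     Args:
--         string (str): Input string to check
--
--     Returns:
--         bool: True if string is in L, False otherwise
--
--     Examples:
--         is_in_language_L("ab") -> true
--         is_in_language_L("aabb") -> true
--         is_in_language_L("aaabbb") -> true
--         is_in_language_L("aba") -> False
--         is_in_language_L("") -> False
--
--
--         #pseudocode
--         1. Test to see if the length of the in math: length(string) > 0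
--         if length(string) > 0 then the string might be part of this language. If it isn't greater than 0 return false.
--
--         2. Look at the characters in the string. If the first character isn't an a return false.
--         3. Count the number of 'a's in the string. Then count the number of 'b's in the string.
--         4. If all the first characters are 'a's and the next characters are 'b's
--          and the number of 'a's in the string is equal to the number of 'b's in the string return true.
--          Otherwise return false.
--     """
--     #Test 1. Length test
--     if( len(string) == 0 ):
--         return False
--
--     #Tests 2 and 3 listed above
--     #The below code makes sure the first letter is 'a'
--     #If the first character is not 'a' or 'b' then it will return false.
--     #If the first character is 'b' it will return false because a_counter is 0.
--     #If the first character is 'a' it will increase a_counter.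
--     #This will only allow the first characters to be 'a's and after the 'a's the next characters need to be 'b's.
--     a_counter = 0
--     b_counter = 0
--     for char in string:
--         if char == 'a' and (b_counter == 0):
--             a_counter += 1
--         elif char == 'b' and (a_counter > 0):
--             b_counter += 1
--         else:
--             return False
--
--     #Test 4 make sure the number of 'a's is the same as the number of 'b's
--     if (a_counter == b_counter):
--         return True
--     else:
--         return False
-- ===== SOURCE B (Python) =====
-- def is_in_language_L(string):
--     n = len(string) // 2
--     return n >= 1 and string == 'a' * n + 'b' * n
-- ===== Notes on version B (the rewrite author's own statement) =====
-- stated objective: simpler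
-- what changed: B replaces the counter-based character scan and branch logic with constructing the canonical string a^n b^n for n = len//2 and a single equality comparison.
import Mathlib
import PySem

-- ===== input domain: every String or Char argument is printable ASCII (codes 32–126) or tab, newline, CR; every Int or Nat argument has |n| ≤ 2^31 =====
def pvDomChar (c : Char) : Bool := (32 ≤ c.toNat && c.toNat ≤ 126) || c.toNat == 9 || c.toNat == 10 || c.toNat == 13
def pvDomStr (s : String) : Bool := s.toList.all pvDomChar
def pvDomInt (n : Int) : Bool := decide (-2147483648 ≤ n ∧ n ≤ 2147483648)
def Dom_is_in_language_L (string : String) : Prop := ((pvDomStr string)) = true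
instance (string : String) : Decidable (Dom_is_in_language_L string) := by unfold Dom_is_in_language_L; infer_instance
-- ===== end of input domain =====

-- B builds the canonical string a^n b^n (n = len//2) and compares by equality, replacing A's counter scan; objective: simpler.


-- ===== PORT A =====
-- the for-loop with early 'return False' becomes a structural recursion over the characters,
-- carrying a_counter/b_counter exactly as in A
def pvLoopA : List Char → Nat → Nat → Bool
  | [], a, b => a == b
  | c :: cs, a, b =>
    if c == 'a' && b == 0 then pvLoopA cs (a + 1) b
    else if c == 'b' && decide (a > 0) then pvLoopA cs a (b + 1)
    else false

def is_in_language_L (string : String) : Bool :=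
  if string.toList.length == 0 then false
  else pvLoopA string.toList 0 0

-- ===== PORT B =====
def is_in_language_L_alt (string : String) : Bool :=
  let n := string.toList.length / 2
  decide (n ≥ 1) && (string.toList == List.replicate n 'a' ++ List.replicate n 'b')

-- ===== PRECONDITION & SPEC =====
def Spec_is_in_language_L (string : String) (out : Bool) : Prop := out = is_in_language_L_alt string
instance (string : String) (out : Bool) : Decidable (Spec_is_in_language_L string out) := by unfold Spec_is_in_language_L; infer_instance

-- ===== CLAIM (what is proved, stated in full; the proofs are below) =====
def Claim_equal_is_in_language_L : Prop := ∀ (string : String), Dom_is_in_language_L string → Spec_is_in_language_L string (is_in_language_L string)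

-- ===== LEMMAS AND PROOFS =====

-- b-phase: once b > 0 (and a > 0), the rest must be exactly (a - b) more 'b's
theorem pvLoopA_bphase (cs : List Char) : ∀ (a b : Nat), 0 < a → 0 < b →
    (pvLoopA cs a b = true ↔ (cs = List.replicate (a - b) 'b' ∧ b ≤ a)) := by
  induction cs with
  | nil =>
    intro a b ha hb
    simp only [pvLoopA, beq_iff_eq]
    constructor
    · intro h
      exact ⟨by rw [h]; simp, by omega⟩
    · intro ⟨h1, h2⟩
      have := congrArg List.length h1
      simp at this
      omega
  | cons c cs ih =>
    intro a b ha hb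
    simp only [pvLoopA]
    by_cases hca : c = 'a'
    · subst hca
      have hno1 : ¬ ((('a' : Char) == 'a') && (b == 0)) = true := by
        intro h; simp at h; omega
      rw [if_neg hno1]
      have hno2 : ¬ ((('a' : Char) == 'b') && decide (a > 0)) = true := by
        intro h; simp at h
      rw [if_neg hno2]
      constructor
      · intro h; cases h
      · intro ⟨h1, h2⟩
        have hab : a - b ≠ 0 := by
          intro h0; rw [h0] at h1; simp at h1
        cases hk : a - b with
        | zero => exact absurd hk hab
        | succ k =>
          rw [hk] at h1
          simp [List.replicate_succ] at h1
    · by_cases hcb : c = 'b'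
      · subst hcb
        have h1 : ¬ ((('b' : Char) == 'a') && (b == 0)) = true := by simp
        rw [if_neg h1]
        have h2 : ((('b' : Char) == 'b') && decide (a > 0)) = true := by simp; omega
        rw [if_pos h2]
        rw [ih a (b + 1) ha (by omega)]
        constructor
        · intro ⟨hc, hle⟩
          constructor
          · have hstep : a - b = (a - (b + 1)) + 1 := by omega
            rw [hstep, List.replicate_succ, hc]
          · omega
        · intro ⟨hc, hle⟩
          have hab : a - b ≠ 0 := by
            intro h0; rw [h0] at hc; simp at hc
          have hstep : a - b = (a - (b + 1)) + 1 := by omega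
          rw [hstep, List.replicate_succ] at hc
          simp only [List.cons.injEq] at hc
          exact ⟨hc.2, by omega⟩
      · have h1 : ¬ ((c == 'a') && (b == 0)) = true := by
          intro h; simp at h; exact hca h.1
        rw [if_neg h1]
        have h2 : ¬ ((c == 'b') && decide (a > 0)) = true := by
          intro h; simp at h; exact hcb h.1
        rw [if_neg h2]
        constructor
        · intro h; cases h
        · intro ⟨hc, _⟩
          have hab : a - b ≠ 0 := by
            intro h0; rw [h0] at hc; simp at hc
          have hstep : a - b = (a - b - 1) + 1 := by omega
          rw [hstep, List.replicate_succ] at hc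
          simp only [List.cons.injEq] at hc
          exact absurd hc.1 hcb

-- a-phase: starting with b = 0 and a a's already read
theorem pvLoopA_aphase (cs : List Char) : ∀ (a : Nat),
    (pvLoopA cs a 0 = true ↔
      ((∃ k, cs = List.replicate k 'a' ∧ a + k = 0) ∨
       (∃ k m, cs = List.replicate k 'a' ++ List.replicate m 'b' ∧ m = a + k ∧ 0 < m))) := by
  induction cs with
  | nil =>
    intro a
    simp only [pvLoopA, beq_iff_eq]
    constructor
    · intro h
      have ha0 : a = 0 := by simpa using h
      left
      exact ⟨0, by simp, by omega⟩
    · rintro (⟨k, hk, h0⟩ | ⟨k, m, hc, hm, hpos⟩)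
      · omega
      · exfalso
        have := congrArg List.length hc
        simp at this
        omega
  | cons c cs ih =>
    intro a
    simp only [pvLoopA]
    by_cases hca : c = 'a'
    · subst hca
      have h1 : ((('a' : Char) == 'a') && ((0 : Nat) == 0)) = true := by simp
      rw [if_pos h1, ih (a + 1)]
      constructor
      · rintro (⟨k, hk, h0⟩ | ⟨k, m, hc, hm, hpos⟩)
        · omega
        · right
          exact ⟨k + 1, m, by rw [List.replicate_succ]; simp [hc], by omega, hpos⟩
      · rintro (⟨k, hk, h0⟩ | ⟨k, m, hc, hm, hpos⟩)
        · exfalso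
          have hk0 : k = 0 := by omega
          rw [hk0] at hk
          simp at hk
        · right
          cases k with
          | zero =>
            exfalso
            cases m with
            | zero => omega
            | succ m' =>
              rw [List.replicate_succ] at hc
              simp at hc
          | succ k' =>
            rw [List.replicate_succ] at hc
            simp at hc
            exact ⟨k', m, hc, by omega, hpos⟩
    · by_cases hcb : c = 'b'
      · subst hcb
        have h1 : ¬ ((('b' : Char) == 'a') && ((0 : Nat) == 0)) = true := by simp
        rw [if_neg h1]
        by_cases hap : 0 < a
        · have h2 : ((('b' : Char) == 'b') && decide (a > 0)) = true := by simp; omega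
          rw [if_pos h2]
          rw [pvLoopA_bphase cs a 1 hap (by omega)]
          constructor
          · intro ⟨hc, hle⟩
            right
            refine ⟨0, a, ?_, by omega, hap⟩
            simp
            rw [hc]
            cases ha : a with
            | zero => omega
            | succ a' =>
              rw [List.replicate_succ]
              simp
          · rintro (⟨k, hk, h0⟩ | ⟨k, m, hc, hm, hpos⟩)
            · omega
            · cases k with
              | zero =>
                simp at hc
                cases m with
                | zero => omega
                | succ m' =>
                  rw [List.replicate_succ] at hc
                  simp at hc
                  constructor
                  · rw [hc]; congr 1; omega
                  · omega
              | succ k' =>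
                rw [List.replicate_succ] at hc
                simp at hc
        · have h2 : ¬ ((('b' : Char) == 'b') && decide (a > 0)) = true := by simp; omega
          rw [if_neg h2]
          constructor
          · intro h; cases h
          · rintro (⟨k, hk, h0⟩ | ⟨k, m, hc, hm, hpos⟩)
            · exfalso
              cases k with
              | zero => simp at hk
              | succ k' => rw [List.replicate_succ] at hk; simp at hk
            · cases k with
              | zero =>
                simp at hc
                cases m with
                | zero => omega
                | succ m' =>
                  rw [List.replicate_succ] at hc
                  simp at hc
                  omega
              | succ k' =>
                rw [List.replicate_succ] at hc
                simp at hc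
      · have h1 : ¬ ((c == 'a') && ((0 : Nat) == 0)) = true := by simp [hca]
        rw [if_neg h1]
        have h2 : ¬ ((c == 'b') && decide (a > 0)) = true := by simp [hcb]
        rw [if_neg h2]
        constructor
        · intro h; cases h
        · rintro (⟨k, hk, h0⟩ | ⟨k, m, hc, hm, hpos⟩)
          · cases k with
            | zero => simp at hk
            | succ k' =>
              rw [List.replicate_succ] at hk
              simp at hk
              exact absurd hk.1 hca
          · cases k with
            | zero =>
              simp at hc
              cases m with
              | zero => omega
              | succ m' =>
                rw [List.replicate_succ] at hc
                simp at hc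
                exact absurd hc.1 hcb
            | succ k' =>
              rw [List.replicate_succ] at hc
              simp at hc
              exact absurd hc.1 hca

-- ===== VERDICT (by name: the statement is the Claim_ definition above) =====
theorem is_in_language_L_spec : Claim_equal_is_in_language_L := by
  unfold Claim_equal_is_in_language_L Spec_is_in_language_L
  intro s _
  unfold is_in_language_L is_in_language_L_alt
  show _ = (decide (s.toList.length / 2 ≥ 1) && (s.toList == List.replicate (s.toList.length / 2) 'a' ++ List.replicate (s.toList.length / 2) 'b'))
  by_cases hnil : s.toList = []
  · rw [hnil]; simp
  · have hlen : s.toList.length ≠ 0 := by simpa using hnil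
    rw [if_neg (by simpa using hlen)]
    cases hA : pvLoopA s.toList 0 0 with
    | false =>
      symm
      rw [Bool.eq_false_iff]
      intro hB
      simp only [Bool.and_eq_true, decide_eq_true_eq, beq_iff_eq] at hB
      obtain ⟨hn, hceq⟩ := hB
      have : pvLoopA s.toList 0 0 = true := by
        rw [pvLoopA_aphase]
        right
        exact ⟨s.toList.length / 2, s.toList.length / 2, hceq, by omega, by omega⟩
      rw [hA] at this; cases this
    | true =>
      rw [pvLoopA_aphase] at hA
      rcases hA with ⟨k, hk, h0⟩ | ⟨k, m, hc, hm, hpos⟩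
      · exfalso
        have hk0 : k = 0 := by omega
        rw [hk0] at hk; simp at hk
        exact hnil (by rw [hk]; rfl)
      · have hmk : m = k := by omega
        subst hmk
        have hl : s.toList.length = 2 * m := by
          rw [hc, List.length_append, List.length_replicate, List.length_replicate]
          omega
        have hn : s.toList.length / 2 = m := by omega
        rw [hn]
        symm
        simp only [Bool.and_eq_true, decide_eq_true_eq, beq_iff_eq]
        exact ⟨by omega, hc⟩
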